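-- pv_equiv track=rewrite | github.com/benekastah/noted | noted/core.py | split_entry
-- ===== SOURCE A (Python) =====
-- MAX_TITLE_LEN = 80
--
-- def split_entry(entry):
--     entry = entry.lstrip()
--     title = []
--     for ch in entry:
--         if ch in ('\n', '\r'):
--             break
--         title.append(ch)
--         if len(title) >= MAX_TITLE_LEN:
--             title.append('\u2026')  # Add ellipsis to the end
--             break
--     title = ''.join(title)
--     body = entry[len(title):].strip()
--     return title, body
-- ===== SOURCE B (Python) =====
-- MAX_TITLE_LEN = 80
--
-- def split_entry(entry):
--     entry = entry.lstrip()
--     n = entry.find('\n')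
--     r = entry.find('\r')
--     if n == -1:
--         nl = r if r != -1 else len(entry)
--     elif r == -1:
--         nl = n
--     else:
--         nl = min(n, r)
--     if nl >= MAX_TITLE_LEN:
--         title = entry[:MAX_TITLE_LEN] + '\u2026'
--     else:
--         title = entry[:nl]
--     body = entry[len(title):].strip()
--     return title, body
-- ===== Notes on version B (the rewrite author's own statement) =====
-- stated objective: simpler
-- what changed: Replaces A's char-by-char accumulation loop (with break-on-newline and break-at-80 logic) by computing the first newline position via str.find and slicing the title and body out directly.
import Mathlib
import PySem

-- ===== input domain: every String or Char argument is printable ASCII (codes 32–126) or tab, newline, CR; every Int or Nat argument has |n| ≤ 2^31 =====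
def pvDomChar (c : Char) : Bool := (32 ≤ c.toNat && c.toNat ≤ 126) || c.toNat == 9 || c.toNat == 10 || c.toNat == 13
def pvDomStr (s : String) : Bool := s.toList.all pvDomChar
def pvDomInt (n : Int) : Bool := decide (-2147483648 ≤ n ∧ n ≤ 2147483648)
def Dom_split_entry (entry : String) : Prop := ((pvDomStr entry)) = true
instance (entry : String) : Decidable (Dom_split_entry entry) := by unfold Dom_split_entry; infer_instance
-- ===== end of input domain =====

-- B replaces A's char-by-char accumulation loop by computing the first newline position
-- with find() and slicing; same return value, a simpler loop-free decomposition.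

-- ===== PORT A =====
-- the 'for ch in entry' loop of A: accumulator 'title', break on newline or at length 80 (then append the ellipsis)
def splitEntryLoopA : List Char → List Char → List Char
  | [], title => title
  | c :: rest, title =>
    if c = '\n' ∨ c = '\r' then title
    else
      let t := title ++ [c]
      if 80 ≤ t.length then t ++ ['…']
      else splitEntryLoopA rest t

def split_entry (entry : String) : String × String :=
  let e := PySem.Str.lstrip entry
  let title := String.ofList (splitEntryLoopA e.toList [])
  let body := PySem.Str.strip (PySem.Str.slice e (some (PySem.Str.len title)) none)
  (title, body)

-- ===== PORT B =====
def split_entry_alt (entry : String) : String × String :=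
  let e := PySem.Str.lstrip entry
  let n := PySem.Str.find e "\n"
  let r := PySem.Str.find e "\r"
  let nl : Int := if n = -1 then (if r ≠ -1 then r else PySem.Str.len e) else if r = -1 then n else min n r
  let title := if 80 ≤ nl then PySem.Str.slice e none (some 80) ++ "…" else PySem.Str.slice e none (some nl)
  let body := PySem.Str.strip (PySem.Str.slice e (some (PySem.Str.len title)) none)
  (title, body)

-- ===== PRECONDITION & SPEC =====
def Spec_split_entry (entry : String) (out : String × String) : Prop := out = split_entry_alt entry
instance (entry : String) (out : String × String) : Decidable (Spec_split_entry entry out) := by unfold Spec_split_entry; infer_instance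

-- ===== CLAIM (what is proved, stated in full; the proofs are below) =====
def Claim_equal_split_entry : Prop := ∀ (entry : String), Dom_split_entry entry → Spec_split_entry entry (split_entry entry)

-- ===== LEMMAS AND PROOFS =====

-- A's loop, characterised by the takeWhile prefix of non-newline characters
theorem splitEntryLoopA_eq (L acc : List Char) (h : acc.length < 80) :
    splitEntryLoopA L acc =
      if 80 ≤ acc.length + (L.takeWhile (fun c => !(c == '\n') && !(c == '\r'))).length
      then acc ++ L.take (80 - acc.length) ++ ['…']
      else acc ++ L.takeWhile (fun c => !(c == '\n') && !(c == '\r')) := by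
  induction L generalizing acc with
  | nil => simp [splitEntryLoopA]; omega
  | cons c t ih =>
    by_cases hc : c = '\n' ∨ c = '\r'
    · have hp : (!(c == '\n') && !(c == '\r')) = false := by
        rcases hc with hc | hc <;> simp [hc]
      simp [splitEntryLoopA, hc, List.takeWhile_cons, hp]
      omega
    · have hp : (!(c == '\n') && !(c == '\r')) = true := by
        have h1 : ¬ c = '\n' := fun h' => hc (Or.inl h')
        have h2 : ¬ c = '\r' := fun h' => hc (Or.inr h')
        simp [h1, h2]
      have hlen : (List.takeWhile (fun c => !(c == '\n') && !(c == '\r')) (c :: t)).length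
          = (List.takeWhile (fun c => !(c == '\n') && !(c == '\r')) t).length + 1 := by
        simp [List.takeWhile_cons, hp]
      by_cases h80 : 80 ≤ acc.length + 1
      · have hacc : acc.length = 79 := by omega
        rw [hlen, if_pos (by omega)]
        have htk : (c :: t).take (80 - acc.length) = [c] := by
          rw [hacc]
          rfl
        rw [htk]
        simp [splitEntryLoopA, hc, hacc]
      · rw [show splitEntryLoopA (c :: t) acc = splitEntryLoopA t (acc ++ [c]) by
          simp [splitEntryLoopA, hc]; omega]
        rw [ih (acc ++ [c]) (by simp; omega), hlen]
        rw [List.takeWhile_cons, hp]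
        apply if_congr (by simp; omega)
        · have h1 : 80 - acc.length = (80 - ((acc ++ [c]).length)) + 1 := by simp; omega
          rw [h1, List.take_succ_cons]
          simp [List.append_assoc]
        · simp [List.append_assoc]

-- first index of c, phrased as the length of the takeWhile (· ≠ c) prefix
theorem firstIdx_prefix (c : Char) (L : List Char) (h : c ∈ L) :
    [c] <+: L.drop (L.takeWhile (fun x => !(x == c))).length := by
  induction L with
  | nil => cases h
  | cons x t ih =>
    by_cases hx : x = c
    · simp [List.takeWhile_cons, hx]
    · have ht : c ∈ t := by rcases List.mem_cons.mp h with h' | h' <;> [exact absurd h'.symm hx; exact h']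
      simpa [List.takeWhile_cons, hx] using ih ht

theorem firstIdx_min (c : Char) (L : List Char) :
    ∀ i < (L.takeWhile (fun x => !(x == c))).length, ¬ [c] <+: L.drop i := by
  induction L with
  | nil => simp
  | cons x t ih =>
    by_cases hx : x = c
    · simp [List.takeWhile_cons, hx]
    · have hlen : (List.takeWhile (fun x => !(x == c)) (x :: t)).length
          = (List.takeWhile (fun x => !(x == c)) t).length + 1 := by
        simp [List.takeWhile_cons, hx]
      intro i hi
      rw [hlen] at hi
      match i with
      | 0 =>
        intro hpre
        rw [List.drop_zero] at hpre
        exact hx (List.cons_prefix_cons.mp hpre).1.symm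
      | i + 1 =>
        intro hpre
        rw [List.drop_succ_cons] at hpre
        exact ih i (by omega) hpre

theorem mem_iff_singleton_infix (c : Char) (L : List Char) : [c] <:+: L ↔ c ∈ L := by
  constructor
  · intro h; exact h.subset (by simp)
  · intro h
    obtain ⟨s, t, rfl⟩ := List.append_of_mem h
    exact ⟨s, t, by simp⟩

-- Python's s.find(single char) is that first index (or -1)
theorem find_single (L : List Char) (c : Char) :
    PySem.Chars.find L [c] =
      if c ∈ L then ((L.takeWhile (fun x => !(x == c))).length : Int) else -1 := by
  by_cases h : c ∈ L
  · have h0 : 0 ≤ PySem.Chars.find L [c] :=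
      (PySem.Chars.find_nonneg_iff L [c]).mpr ((mem_iff_singleton_infix c L).mpr h)
    obtain ⟨hpre, hmin⟩ := PySem.Chars.find_spec h0
    set j0 := (L.takeWhile (fun x => !(x == c))).length with hj0
    have hle : (PySem.Chars.find L [c]).toNat ≤ j0 := by
      by_contra hlt
      exact hmin j0 (by omega) (firstIdx_prefix c L h)
    have hge : j0 ≤ (PySem.Chars.find L [c]).toNat := by
      by_contra hlt
      exact firstIdx_min c L _ (by omega) hpre
    have heq : (PySem.Chars.find L [c]).toNat = j0 := le_antisymm hle hge
    rw [if_pos h, ← heq, Int.toNat_of_nonneg h0]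
  · rw [if_neg h]
    exact (PySem.Chars.find_eq_neg_one_iff L [c]).mpr
      (fun hin => h ((mem_iff_singleton_infix c L).mp hin))

theorem takeWhile_and_length (p q : Char → Bool) (L : List Char) :
    (L.takeWhile (fun x => p x && q x)).length
      = min (L.takeWhile p).length (L.takeWhile q).length := by
  induction L with
  | nil => simp
  | cons x t ih =>
    by_cases hp : p x <;> by_cases hq : q x <;>
      simp [List.takeWhile_cons, hp, hq, ih] <;> try omega

theorem take_takeWhile_length (p : Char → Bool) (L : List Char) :
    L.take (L.takeWhile p).length = L.takeWhile p :=
  (List.prefix_iff_eq_take.mp (List.takeWhile_prefix p)).symm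

-- titles agree (body is the same expression in the two ports, applied to the title)
theorem title_eq (e : String) :
    String.ofList (splitEntryLoopA e.toList []) =
      (let n := PySem.Str.find e "\n"
       let r := PySem.Str.find e "\r"
       let nl : Int := if n = -1 then (if r ≠ -1 then r else PySem.Str.len e) else if r = -1 then n else min n r
       if 80 ≤ nl then PySem.Str.slice e none (some 80) ++ "…" else PySem.Str.slice e none (some nl)) := by
  simp only [PySem.Str.find_eq, PySem.Str.len_eq]
  have hn1 : ("\n" : String).toList = ['\n'] := rfl
  have hr1 : ("\r" : String).toList = ['\r'] := rfl
  rw [hn1, hr1, find_single, find_single]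
  set L := e.toList with hL
  set jn := (L.takeWhile (fun x => !(x == '\n'))).length with hjn
  set jr := (L.takeWhile (fun x => !(x == '\r'))).length with hjr
  set k := (L.takeWhile (fun c => !(c == '\n') && !(c == '\r'))).length with hk
  have hkmin : k = min jn jr := takeWhile_and_length _ _ L
  have hjnle : jn ≤ L.length := (List.takeWhile_prefix _).length_le
  have hjrle : jr ≤ L.length := (List.takeWhile_prefix _).length_le
  have hnl : (if (if '\n' ∈ L then (jn : Int) else -1) = -1 then
        (if (if '\r' ∈ L then (jr : Int) else -1) ≠ -1 then (if '\r' ∈ L then (jr : Int) else -1)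
         else (L.length : Int))
      else if (if '\r' ∈ L then (jr : Int) else -1) = -1 then (if '\n' ∈ L then (jn : Int) else -1)
      else min (if '\n' ∈ L then (jn : Int) else -1) (if '\r' ∈ L then (jr : Int) else -1)) = (k : Int) := by
    have hjn_all : '\n' ∉ L → jn = L.length := by
      intro hmem
      rw [hjn, List.takeWhile_eq_self_iff.mpr (fun x hx => by
        simp [show ¬ x = '\n' from fun h' => hmem (h' ▸ hx)])]
    have hjr_all : '\r' ∉ L → jr = L.length := by
      intro hmem
      rw [hjr, List.takeWhile_eq_self_iff.mpr (fun x hx => by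
        simp [show ¬ x = '\r' from fun h' => hmem (h' ▸ hx)])]
    have hjnne : ((jn : Int)) ≠ -1 := by omega
    have hjrne : ((jr : Int)) ≠ -1 := by omega
    by_cases hmn : '\n' ∈ L <;> by_cases hmr : '\r' ∈ L
    · simp [hmn, hmr, hjnne, hjrne]
      omega
    · have h4 := hjr_all hmr
      simp [hmn, hmr, hjnne, hjrne]
      omega
    · have h3 := hjn_all hmn
      simp [hmn, hmr, hjnne, hjrne]
      omega
    · have h3 := hjn_all hmn
      have h4 := hjr_all hmr
      simp [hmn, hmr]
      omega
  rw [hnl]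
  by_cases h80 : 80 ≤ k
  · rw [if_pos (by exact_mod_cast h80)]
    apply String.toList_inj.mp
    rw [String.toList_append, PySem.Str.toList_slice]
    have hsl : PySem.Chars.slice e.toList none (some 80) = L.take 80 := by
      rw [PySem.Chars.slice_eq_listSlice, ← hL]
      exact_mod_cast PySem.List.slice_to_natCast L 80
    rw [hsl, show ("…" : String).toList = ['…'] from rfl]
    rw [show (String.ofList (splitEntryLoopA e.toList [])).toList = splitEntryLoopA L [] by
      simp [← hL]]
    rw [splitEntryLoopA_eq L [] (by norm_num),
      if_pos (by simp only [List.length_nil, Nat.zero_add, ← hk]; exact h80)]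
    simp
  · rw [if_neg (by exact_mod_cast h80)]
    apply String.toList_inj.mp
    rw [PySem.Str.toList_slice, PySem.Chars.slice_eq_listSlice, ← hL]
    rw [PySem.List.slice_to_natCast L k]
    rw [show (String.ofList (splitEntryLoopA e.toList [])).toList = splitEntryLoopA L [] by
      simp [← hL]]
    rw [splitEntryLoopA_eq L [] (by norm_num),
      if_neg (by simp only [List.length_nil, Nat.zero_add, ← hk]; exact h80)]
    simp only [List.nil_append]
    rw [hk]
    exact (take_takeWhile_length _ L).symm

-- ===== VERDICT (by name: the statement is the Claim_ definition above) =====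
theorem split_entry_spec : Claim_equal_split_entry := by
  intro entry _
  unfold Spec_split_entry split_entry split_entry_alt
  simp only [title_eq (PySem.Str.lstrip entry)]
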